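-- pv_equiv track=rewrite | github.com/hulchenko/django-react-wordle | hangman.py | highlight_guessed_input
-- ===== SOURCE A (Python) =====
-- def highlight_guessed_input(input, word_array):
--     def mark_green(letter):
--         return f">{letter}<"
--
--     def mark_yellow(letter):
--         return f"*{letter}*"
--
--     result = [""] * len(word_array)
--     tracking_letters = list(word_array) # duplicate array
--
--     for i in range(len(word_array)):
--         if input[i] == word_array[i]:
--             result[i] = mark_green(input[i])
--             tracking_letters[i] = None # mark as used
--     for i in range(len(word_array)):
--         if result[i] == "":
--             if input[i] in tracking_letters: # this should now ignore all green marked letters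
--                 result[i] = mark_yellow(input[i])
--                 marked_char_idx = tracking_letters.index(input[i])
--                 tracking_letters[marked_char_idx] = None # mark as used
--             else:
--                 result[i] = input[i]
--     return result
-- ===== SOURCE B (Python) =====
-- def highlight_guessed_input(input, word_array):
--     n = len(word_array)
--
--     # Stateless closed form: a non-green position i with letter c is yellow
--     # iff the occurrence rank of c among earlier non-green input positions is
--     # below the total count of c among non-green word letters (this is exactly
--     # the quantity A's left-to-right consumption of tracking_letters realises).
--     def cell(i):
--         c = input[i]
--         if c == word_array[i]:
--             return f">{c}<"
--         rank = sum(1 for j in range(i) if input[j] != word_array[j] and input[j] == c)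
--         avail = sum(1 for j in range(n) if input[j] != word_array[j] and word_array[j] == c)
--         return f"*{c}*" if rank < avail else c
--
--     return [cell(i) for i in range(n)]
-- ===== Notes on version B (the rewrite author's own statement) =====
-- stated objective: alternative
-- what changed: Replaces A's stateful two-pass algorithm (tombstone copy of the word consumed via 'in' membership and list.index mutation) by a stateless per-position closed form: each cell is computed independently as green / yellow-if-occurrence-rank-below-availability / plain, with no mutable tracking state at all.
import Mathlib
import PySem

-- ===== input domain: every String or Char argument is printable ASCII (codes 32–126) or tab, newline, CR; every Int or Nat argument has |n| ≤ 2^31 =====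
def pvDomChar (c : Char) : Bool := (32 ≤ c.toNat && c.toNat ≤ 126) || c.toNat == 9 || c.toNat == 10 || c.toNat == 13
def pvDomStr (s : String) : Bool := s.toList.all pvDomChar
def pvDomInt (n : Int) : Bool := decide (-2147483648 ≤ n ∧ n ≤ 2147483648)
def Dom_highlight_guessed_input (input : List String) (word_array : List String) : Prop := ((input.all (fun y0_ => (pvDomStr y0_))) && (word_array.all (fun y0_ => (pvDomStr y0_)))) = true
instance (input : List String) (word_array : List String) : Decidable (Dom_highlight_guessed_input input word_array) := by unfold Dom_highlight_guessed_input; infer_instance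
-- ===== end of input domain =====

-- B replaces A's stateful two-pass tombstone/consumption algorithm by a stateless
-- per-position closed form (occurrence rank below availability) — objective: alternative.

-- ===== PORT A =====
def hgiGreen (letter : String) : String := ">" ++ letter ++ "<"

def hgiYellow (letter : String) : String := "*" ++ letter ++ "*"

-- first loop: mark greens in result, tombstone (None) the used word letters
def hgiStep1 (input word_array : List String) (st : List String × List (Option String)) (i : Int) :
    List String × List (Option String) :=
  if PySem.List.pyGetD input i "" = PySem.List.pyGetD word_array i "" then
    (st.1.set i.toNat (hgiGreen (PySem.List.pyGetD input i "")), st.2.set i.toNat none)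
  else st

-- second loop: yellow if the letter is still in tracking_letters (first occurrence tombstoned)
def hgiStep2 (input : List String) (st : List String × List (Option String)) (i : Int) :
    List String × List (Option String) :=
  if PySem.List.pyGetD st.1 i "" = "" then
    if some (PySem.List.pyGetD input i "") ∈ st.2 then
      (st.1.set i.toNat (hgiYellow (PySem.List.pyGetD input i "")),
       match PySem.List.index? st.2 (some (PySem.List.pyGetD input i "")) with
       | some k => st.2.set k none
       | none => st.2)
    else (st.1.set i.toNat (PySem.List.pyGetD input i ""), st.2)
  else st

def highlight_guessed_input (input : List String) (word_array : List String) : List String :=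
  ((PySem.List.pyRange 0 (word_array.length : Int) 1).foldl (hgiStep2 input)
    ((PySem.List.pyRange 0 (word_array.length : Int) 1).foldl (hgiStep1 input word_array)
      (List.replicate word_array.length "", word_array.map some))).1

-- ===== PORT B =====
-- cell(i): green / yellow-if-rank-below-availability / plain; the 0/1-sums are countP
def hgiCell (input word_array : List String) (n : Int) (i : Int) : String :=
  let c := PySem.List.pyGetD input i ""
  if c = PySem.List.pyGetD word_array i "" then ">" ++ c ++ "<"
  else
    let rank := (PySem.List.pyRange 0 i 1).countP (fun j =>
      PySem.List.pyGetD input j "" != PySem.List.pyGetD word_array j "" &&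
      PySem.List.pyGetD input j "" == c)
    let avail := (PySem.List.pyRange 0 n 1).countP (fun j =>
      PySem.List.pyGetD input j "" != PySem.List.pyGetD word_array j "" &&
      PySem.List.pyGetD word_array j "" == c)
    if rank < avail then "*" ++ c ++ "*" else c

def highlight_guessed_input_alt (input : List String) (word_array : List String) : List String :=
  (PySem.List.pyRange 0 (word_array.length : Int) 1).map
    (hgiCell input word_array (word_array.length : Int))

-- ===== PRECONDITION & SPEC =====
-- A reads input[i] for every position i of word_array, so it raises IndexError
-- when input is shorter than word_array; exactly those inputs are excluded.
def Pre_highlight_guessed_input (input : List String) (word_array : List String) : Prop :=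
  word_array.length ≤ input.length
instance (input : List String) (word_array : List String) : Decidable (Pre_highlight_guessed_input input word_array) := by unfold Pre_highlight_guessed_input; infer_instance

def pvWitness_highlight_guessed_input : List String × List String :=
  (["a", "b", "a"], ["b", "a", "a"])

def Spec_highlight_guessed_input (input : List String) (word_array : List String) (out : List String) : Prop := out = highlight_guessed_input_alt input word_array
instance (input : List String) (word_array : List String) (out : List String) : Decidable (Spec_highlight_guessed_input input word_array out) := by unfold Spec_highlight_guessed_input; infer_instance

-- ===== CLAIM (what is proved, stated in full; the proofs are below) =====
def Claim_equal_highlight_guessed_input : Prop := ∀ (input : List String) (word_array : List String), Dom_highlight_guessed_input input word_array → Pre_highlight_guessed_input input word_array → Spec_highlight_guessed_input input word_array (highlight_guessed_input input word_array)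

-- ===== LEMMAS AND PROOFS =====

-- the letter read at position j (both ports read through pyGetD with default "")
def pvXat (xs : List String) (j : Nat) : String := PySem.List.pyGetD xs (j : Int) ""

-- occurrence rank: non-green input positions j < k carrying letter c
def pvC (xs ws : List String) (k : Nat) (c : String) : Nat :=
  (List.range k).countP (fun j => decide (¬ pvXat xs j = pvXat ws j ∧ pvXat xs j = c))

-- availability: non-green word positions carrying letter c
def pvAvail (xs ws : List String) (c : String) : Nat :=
  (List.range ws.length).countP (fun j => decide (¬ pvXat xs j = pvXat ws j ∧ pvXat ws j = c))

-- the Nat-level reading of B's cell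
def pvCell (xs ws : List String) (i : Nat) : String :=
  if pvXat xs i = pvXat ws i then hgiGreen (pvXat xs i)
  else if pvC xs ws i (pvXat xs i) < pvAvail xs ws (pvXat xs i) then hgiYellow (pvXat xs i)
  else pvXat xs i

-- A's result / tracking lists after the first loop has processed positions 0..k-1
def pvR (xs ws : List String) (k : Nat) : List String :=
  (List.range ws.length).map
    (fun j => if j < k ∧ pvXat xs j = pvXat ws j then hgiGreen (pvXat xs j) else "")

def pvT (xs ws : List String) (k : Nat) : List (Option String) :=
  (List.range ws.length).map
    (fun j => if j < k ∧ pvXat xs j = pvXat ws j then none else some (pvXat ws j))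

-- state of A's second loop after k steps
def pvA2 (xs ws : List String) (k : Nat) : List String × List (Option String) :=
  (PySem.List.pyRange 0 (k : Int) 1).foldl (hgiStep2 xs) (pvR xs ws ws.length, pvT xs ws ws.length)

lemma hgiGreen_ne_empty (x : String) : hgiGreen x ≠ "" := by simp [hgiGreen]

lemma pvR_length (xs ws : List String) (k : Nat) : (pvR xs ws k).length = ws.length := by
  simp [pvR]

lemma pvR_zero (xs ws : List String) : pvR xs ws 0 = List.replicate ws.length "" := by
  simp [pvR]

lemma pvT_zero (xs ws : List String) : pvT xs ws 0 = ws.map some := by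
  apply List.ext_getElem (by simp [pvT])
  intro i h1 h2
  have hi : i < ws.length := by simpa using h2
  simp [pvT, pvXat, PySem.List.pyGetD_natCast, List.getD_eq_getElem?_getD,
    List.getElem?_eq_getElem hi]

lemma pvR_succ_of_eq (xs ws : List String) (k : Nat)
    (h : pvXat xs k = pvXat ws k) :
    (pvR xs ws k).set k (hgiGreen (pvXat xs k)) = pvR xs ws (k + 1) := by
  apply List.ext_getElem (by simp [pvR])
  intro i h1 h2
  simp only [pvR, List.getElem_set, List.getElem_map, List.getElem_range]
  by_cases hik : k = i
  · subst hik; simp [h]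
  · have : (i < k + 1) ↔ (i < k) := by omega
    simp [hik, this]

lemma pvT_succ_of_eq (xs ws : List String) (k : Nat)
    (h : pvXat xs k = pvXat ws k) :
    (pvT xs ws k).set k none = pvT xs ws (k + 1) := by
  apply List.ext_getElem (by simp [pvT])
  intro i h1 h2
  simp only [pvT, List.getElem_set, List.getElem_map, List.getElem_range]
  by_cases hik : k = i
  · subst hik; simp [h]
  · have : (i < k + 1) ↔ (i < k) := by omega
    simp [hik, this]

lemma pvR_succ_of_ne (xs ws : List String) (k : Nat) (h : ¬ pvXat xs k = pvXat ws k) :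
    pvR xs ws k = pvR xs ws (k + 1) := by
  apply List.ext_getElem (by simp [pvR])
  intro i h1 h2
  simp only [pvR, List.getElem_map, List.getElem_range]
  by_cases hik : i = k
  · subst hik; simp [h]
  · have : (i < k + 1) ↔ (i < k) := by omega
    simp only [this]

lemma pvT_succ_of_ne (xs ws : List String) (k : Nat) (h : ¬ pvXat xs k = pvXat ws k) :
    pvT xs ws k = pvT xs ws (k + 1) := by
  apply List.ext_getElem (by simp [pvT])
  intro i h1 h2
  simp only [pvT, List.getElem_map, List.getElem_range]
  by_cases hik : i = k
  · subst hik; simp [h]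
  · have : (i < k + 1) ↔ (i < k) := by omega
    simp only [this]

-- the first loop computes (pvR, pvT)
lemma hgi_pass1 (xs ws : List String) (k : Nat) (hk : k ≤ ws.length) :
    (PySem.List.pyRange 0 (k : Int) 1).foldl (hgiStep1 xs ws)
      (List.replicate ws.length "", ws.map some) = (pvR xs ws k, pvT xs ws k) := by
  induction k with
  | zero =>
    rw [PySem.List.pyRange_one_eq_nil (by omega)]
    simp [pvR_zero, pvT_zero]
  | succ k ih =>
    have hk' : k ≤ ws.length := by omega
    have hcast : ((k + 1 : Nat) : Int) = (k : Int) + 1 := by push_cast; ring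
    rw [hcast, PySem.List.pyRange_one_succ_right (by positivity), List.foldl_append,
      ih hk']
    simp only [List.foldl_cons, List.foldl_nil, hgiStep1]
    by_cases h : pvXat xs k = pvXat ws k
    · rw [if_pos (by exact h)]
      simp only [Int.toNat_natCast,
        show PySem.List.pyGetD xs (k : Int) "" = pvXat xs k from rfl]
      rw [pvR_succ_of_eq xs ws k h, pvT_succ_of_eq xs ws k h]
    · rw [if_neg (by exact h)]
      rw [pvR_succ_of_ne xs ws k h, pvT_succ_of_ne xs ws k h]

-- the tracking list after the first full pass holds exactly pvAvail copies of each letter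
lemma count_pvT (xs ws : List String) (s : String) :
    (pvT xs ws ws.length).count (some s) = pvAvail xs ws s := by
  rw [List.count_eq_countP]
  unfold pvT pvAvail
  rw [List.countP_map]
  apply List.countP_congr
  intro j hj
  have hjn : j < ws.length := List.mem_range.mp hj
  by_cases h : pvXat xs j = pvXat ws j
  · simp [Function.comp, hjn, h]
  · simp [Function.comp, hjn, h]

-- B's countP over pyRange is pvC / pvAvail
lemma hgi_rank_bridge (xs ws : List String) (k : Nat) (c : String) :
    (PySem.List.pyRange 0 (k : Int) 1).countP (fun j =>
      PySem.List.pyGetD xs j "" != PySem.List.pyGetD ws j "" &&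
      PySem.List.pyGetD xs j "" == c) = pvC xs ws k c := by
  unfold pvC
  rw [PySem.List.pyRange_one, List.countP_map]
  simp only [sub_zero, Int.toNat_natCast, zero_add]
  apply List.countP_congr
  intro j hj
  simp [Function.comp, pvXat, and_comm]

lemma hgi_avail_bridge (xs ws : List String) (c : String) :
    (PySem.List.pyRange 0 (ws.length : Int) 1).countP (fun j =>
      PySem.List.pyGetD xs j "" != PySem.List.pyGetD ws j "" &&
      PySem.List.pyGetD ws j "" == c) = pvAvail xs ws c := by
  unfold pvAvail
  rw [PySem.List.pyRange_one, List.countP_map]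
  simp only [sub_zero, Int.toNat_natCast, zero_add]
  apply List.countP_congr
  intro j hj
  simp [Function.comp, pvXat, and_comm]

lemma hgiCell_natCast (xs ws : List String) (k : Nat) :
    hgiCell xs ws (ws.length : Int) (k : Int) = pvCell xs ws k := by
  unfold hgiCell pvCell
  simp only [show PySem.List.pyGetD xs (k : Int) "" = pvXat xs k from rfl,
    show PySem.List.pyGetD ws (k : Int) "" = pvXat ws k from rfl,
    hgi_rank_bridge, hgi_avail_bridge, hgiGreen, hgiYellow]

lemma pvC_succ (xs ws : List String) (k : Nat) (c : String) :
    pvC xs ws (k + 1) c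
      = pvC xs ws k c + (if ¬ pvXat xs k = pvXat ws k ∧ pvXat xs k = c then 1 else 0) := by
  unfold pvC
  rw [List.range_succ, List.countP_append]
  by_cases h : ¬ pvXat xs k = pvXat ws k ∧ pvXat xs k = c <;> simp [h]

lemma pvA2_succ (xs ws : List String) (k : Nat) :
    pvA2 xs ws (k + 1) = hgiStep2 xs (pvA2 xs ws k) (k : Int) := by
  unfold pvA2
  have hcast : ((k + 1 : Nat) : Int) = (k : Int) + 1 := by push_cast; ring
  rw [hcast, PySem.List.pyRange_one_succ_right (by positivity), List.foldl_append]
  simp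

lemma pvSetMid (o rest : List String) (c v : String) (k : Nat) (hk : o.length = k) :
    (o ++ c :: rest).set k v = o ++ v :: rest := by subst hk; simp

-- the coupled invariant of A's second loop against B's closed form
lemma hgi_pass2 (xs ws : List String) (k : Nat) (hk : k ≤ ws.length) :
    (pvA2 xs ws k).1
        = (List.range k).map (pvCell xs ws) ++ (pvR xs ws ws.length).drop k
      ∧ ∀ s, (pvA2 xs ws k).2.count (some s)
        = pvAvail xs ws s - min (pvAvail xs ws s) (pvC xs ws k s) := by
  induction k with
  | zero =>
    refine ⟨?_, ?_⟩
    · unfold pvA2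
      rw [show ((0 : Nat) : Int) = 0 from rfl, PySem.List.pyRange_one_eq_nil le_rfl]
      simp
    · intro s
      unfold pvA2
      rw [show ((0 : Nat) : Int) = 0 from rfl, PySem.List.pyRange_one_eq_nil le_rfl]
      simp only [List.foldl_nil]
      rw [count_pvT]
      simp [pvC]
  | succ k ih =>
    have hk' : k ≤ ws.length := by omega
    have hkk : k < ws.length := by omega
    obtain ⟨h1, h3⟩ := ih hk'
    have h2 : ((List.range k).map (pvCell xs ws)).length = k := by simp
    have hlenR : (pvR xs ws ws.length).length = ws.length := pvR_length xs ws ws.length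
    have hdrop : (pvR xs ws ws.length).drop k
        = (if pvXat xs k = pvXat ws k then hgiGreen (pvXat xs k) else "")
          :: (pvR xs ws ws.length).drop (k + 1) := by
      rw [List.drop_eq_getElem_cons (by rw [hlenR]; exact hkk)]
      simp [pvR, hkk]
    have hread : PySem.List.pyGetD (pvA2 xs ws k).1 (k : Int) ""
        = if pvXat xs k = pvXat ws k then hgiGreen (pvXat xs k) else "" := by
      rw [h1, hdrop, PySem.List.pyGetD_natCast,
        List.getD_eq_getElem?_getD, List.getElem?_append_right (by rw [h2])]
      simp [h2]
    have hmapsucc : (List.range (k + 1)).map (pvCell xs ws)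
        = (List.range k).map (pvCell xs ws) ++ [pvCell xs ws k] := by
      rw [List.range_succ, List.map_append]; simp
    rw [pvA2_succ]
    simp only [hgiStep2, hread, Int.toNat_natCast,
      show PySem.List.pyGetD xs (k : Int) "" = pvXat xs k from rfl]
    by_cases hG : pvXat xs k = pvXat ws k
    · rw [if_neg (by simp [hG, hgiGreen_ne_empty])]
      refine ⟨?_, ?_⟩
      · rw [h1, hdrop, if_pos hG, hmapsucc]
        simp [pvCell, hG]
      · intro s
        rw [h3 s, pvC_succ]
        simp [hG]
    · rw [if_pos (by simp [hG])]
      have hmem : some (pvXat xs k) ∈ (pvA2 xs ws k).2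
          ↔ pvC xs ws k (pvXat xs k) < pvAvail xs ws (pvXat xs k) := by
        rw [← List.count_pos_iff, h3 (pvXat xs k)]
        omega
      by_cases hY : pvC xs ws k (pvXat xs k) < pvAvail xs ws (pvXat xs k)
      · have hm : some (pvXat xs k) ∈ (pvA2 xs ws k).2 := hmem.mpr hY
        obtain ⟨m, hidx⟩ : ∃ m, PySem.List.index? (pvA2 xs ws k).2 (some (pvXat xs k)) = some m := by
          have := (PySem.List.index?_isSome_iff (pvA2 xs ws k).2 (some (pvXat xs k))).mpr hm
          exact Option.isSome_iff_exists.mp this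
        obtain ⟨pre, suf, hts, hpl, _⟩ :=
          (PySem.List.index?_eq_some_iff (pvA2 xs ws k).2 (some (pvXat xs k)) m).mp hidx
        have hset : (pvA2 xs ws k).2.set m none = pre ++ none :: suf := by
          rw [hts, ← hpl]; simp
        rw [if_pos hm]
        simp only [hidx]
        refine ⟨?_, ?_⟩
        · rw [h1, hdrop, if_neg hG, pvSetMid _ _ _ _ _ h2, hmapsucc]
          simp [pvCell, hG, hY]
        · intro s
          rw [hset, pvC_succ]
          have hcount := h3 s
          rw [hts] at hcount
          by_cases hs : pvXat xs k = s
          · subst hs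
            have hnew : List.count (some (pvXat xs k)) (pre ++ none :: suf) + 1
                = pvAvail xs ws (pvXat xs k)
                  - min (pvAvail xs ws (pvXat xs k)) (pvC xs ws k (pvXat xs k)) := by
              rw [← hcount]; simp [List.count_append]; omega
            simp only [hG, not_false_iff, true_and, if_true]
            omega
          · have hne : (some (pvXat xs k) : Option String) ≠ some s := by simpa using hs
            simp only [List.count_append, List.count_cons] at hcount ⊢
            have : ¬ (¬ pvXat xs k = pvXat ws k ∧ pvXat xs k = s) := fun hh => hs hh.2
            simp only [this, if_false, add_zero]
            simpa [hne, hs] using hcount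
      · have hm : some (pvXat xs k) ∉ (pvA2 xs ws k).2 := fun h => hY (hmem.mp h)
        rw [if_neg hm]
        refine ⟨?_, ?_⟩
        · rw [h1, hdrop, if_neg hG, pvSetMid _ _ _ _ _ h2, hmapsucc]
          simp [pvCell, hG, hY]
        · intro s
          rw [h3 s, pvC_succ]
          by_cases hs : pvXat xs k = s
          · subst hs
            simp only [hG, not_false_iff, true_and, if_true]
            omega
          · have : ¬ (¬ pvXat xs k = pvXat ws k ∧ pvXat xs k = s) := fun hh => hs hh.2
            simp [this]

-- ===== VERDICT (by name: the statement is the Claim_ definition above) =====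
theorem highlight_guessed_input_spec : Claim_equal_highlight_guessed_input := by
  intro input word_array _ _
  unfold Spec_highlight_guessed_input highlight_guessed_input highlight_guessed_input_alt
  rw [hgi_pass1 input word_array word_array.length le_rfl]
  have h := (hgi_pass2 input word_array word_array.length le_rfl).1
  unfold pvA2 at h
  rw [h]
  rw [show (pvR input word_array word_array.length).drop word_array.length = [] from by
    rw [List.drop_eq_nil_iff, pvR_length]]
  rw [List.append_nil, PySem.List.pyRange_one, List.map_map]
  simp only [sub_zero, Int.toNat_natCast]
  apply List.map_congr_left
  intro j _
  simp [Function.comp, hgiCell_natCast]
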